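-- pv_equiv track=rewrite | github.com/benallenclark/job-analysis | charts/plot_skill_network.py | compute_skill_edges
-- ===== SOURCE A (Python) =====
-- from collections import defaultdict
-- from itertools import combinations
--
-- def compute_skill_edges(job_skill_map):
--     """
--     Computes weighted edges between skills based on co-occurrence in job postings.
--
--     Args:
--         job_skill_map (dict): job_id → set of skills
--
--     Returns:
--         dict: (skill1, skill2) → count of co-occurrences
--     """
--     edge_weights = defaultdict(int)
--     for skills in job_skill_map.values():
--         skill_list = [s.lower() for s in skills]
--         for skill1, skill2 in combinations(set(skill_list), 2):
--             key = tuple(sorted([skill1, skill2]))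
--             edge_weights[key] += 1
--     return edge_weights
-- ===== SOURCE B (Python) =====
-- from collections import defaultdict
-- from itertools import combinations
--
-- def compute_skill_edges(job_skill_map):
--     """Inverted index: skill -> set of job positions; each edge weight is the
--     size of the intersection of the two skills' posting sets (no per-pair
--     increment counting)."""
--     index = defaultdict(set)
--     job_sets = []
--     for pos, skills in enumerate(job_skill_map.values()):
--         sset = {s.lower() for s in skills}
--         job_sets.append(sset)
--         for s in sset:
--             index[s].add(pos)
--     edge_weights = defaultdict(int)
--     for sset in job_sets:
--         for pair in combinations(sset, 2):
--             key = tuple(sorted(pair))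
--             if key not in edge_weights:
--                 edge_weights[key] = len(index[key[0]] & index[key[1]])
--     return edge_weights
-- ===== Notes on version B (the rewrite author's own statement) =====
-- stated objective: alternative
-- what changed: B replaces A's per-pair increment counting with an inverted index: one pass builds skill -> set of job positions, and each edge weight is computed once as the size of the intersection of the two skills' posting sets (insert-if-new instead of defaultdict increments).
import Mathlib
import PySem

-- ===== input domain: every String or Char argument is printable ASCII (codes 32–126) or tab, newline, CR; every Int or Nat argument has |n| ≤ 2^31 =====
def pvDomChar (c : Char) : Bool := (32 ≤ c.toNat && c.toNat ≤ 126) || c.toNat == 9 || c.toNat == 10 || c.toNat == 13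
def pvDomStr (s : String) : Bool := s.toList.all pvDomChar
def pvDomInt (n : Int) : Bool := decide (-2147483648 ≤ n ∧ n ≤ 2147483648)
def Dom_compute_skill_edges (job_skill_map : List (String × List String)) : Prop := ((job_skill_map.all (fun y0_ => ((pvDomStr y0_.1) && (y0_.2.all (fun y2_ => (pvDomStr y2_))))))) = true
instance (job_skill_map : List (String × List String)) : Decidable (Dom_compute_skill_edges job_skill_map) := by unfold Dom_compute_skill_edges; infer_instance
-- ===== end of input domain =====

-- B replaces A's per-pair increment counting by an inverted index skill → set of job
-- positions, each edge weight being one set intersection — objective: alternative.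
-- Note: Python iterates combinations over a hash-ordered set; the result dict's counts
-- and key set do not depend on that order, and dict outputs are compared ignoring order.

-- ===== PORT A =====
-- combinations(xs, 2): all (xs[i], xs[j]) with i < j, in order (itertools.combinations; shared by both ports)
def pvCombs2 (xs : List String) : List (String × String) :=
  match xs with
  | [] => []
  | x :: rest => rest.map (fun y => (x, y)) ++ pvCombs2 rest

def compute_skill_edges (job_skill_map : List (String × List String)) : List (String × String × Int) :=
  (job_skill_map.foldl
    (fun edge_weights job =>
      let skill_list := job.2.map PySem.Str.lower
      (pvCombs2 (PySem.Set.ofList skill_list)).foldl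
        (fun ew p =>
          -- key = tuple(sorted([skill1, skill2])): a stable sort of a 2-list swaps iff p.2 < p.1
          let key := if p.2 < p.1 then (p.2, p.1) else (p.1, p.2)
          PySem.Dict.modify ew key (0 : Int) (· + 1))
        edge_weights)
    (PySem.Dict.empty : PySem.Dict (String × String) Int)
    -- the dict of pair-keys, re-associated to the declared triple type
    ).items.map (fun e => (e.1.1, e.1.2, e.2))

-- ===== PORT B =====
-- first loop: pos, skills in enumerate(values); sset = {s.lower() for s in skills};
-- job_sets.append(sset); for s in sset: index[s].add(pos)
def pvPhase1 (l : List (Int × (String × List String)))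
    (st : PySem.Dict String (PySem.Set Int) × List (PySem.Set String)) :
    PySem.Dict String (PySem.Set Int) × List (PySem.Set String) :=
  l.foldl
    (fun st pj =>
      let sset : PySem.Set String := PySem.Set.ofList (pj.2.2.map PySem.Str.lower)
      (sset.foldl (fun idx s => PySem.Dict.modify idx s ([] : PySem.Set Int)
          (fun js => PySem.Set.add js pj.1)) st.1,
       st.2 ++ [sset]))
    st

-- second loop: for sset in job_sets: for pair in combinations(sset, 2):
--   key = tuple(sorted(pair)); if key not in edge_weights: edge_weights[key] = len(index[key[0]] & index[key[1]])
def pvPhase2 (index : PySem.Dict String (PySem.Set Int)) (job_sets : List (PySem.Set String))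
    (ew : PySem.Dict (String × String) Int) : PySem.Dict (String × String) Int :=
  job_sets.foldl
    (fun ew sset =>
      (pvCombs2 sset).foldl
        (fun ew p =>
          let key := if p.2 < p.1 then (p.2, p.1) else (p.1, p.2)
          if ew.contains key then ew
          else ew.insert key (PySem.Set.len (PySem.Set.inter
            (PySem.Dict.getD index key.1 []) (PySem.Dict.getD index key.2 []))))
        ew)
    ew

def compute_skill_edges_alt (job_skill_map : List (String × List String)) : List (String × String × Int) :=
  let st := pvPhase1 (PySem.List.enumerate job_skill_map)
    ((PySem.Dict.empty : PySem.Dict String (PySem.Set Int)), ([] : List (PySem.Set String)))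
  (pvPhase2 st.1 st.2 (PySem.Dict.empty : PySem.Dict (String × String) Int)).items.map
    (fun e => (e.1.1, e.1.2, e.2))

-- ===== PRECONDITION & SPEC =====
def Spec_compute_skill_edges (job_skill_map : List (String × List String)) (out : List (String × String × Int)) : Prop := out = compute_skill_edges_alt job_skill_map
instance (job_skill_map : List (String × List String)) (out : List (String × String × Int)) : Decidable (Spec_compute_skill_edges job_skill_map out) := by unfold Spec_compute_skill_edges; infer_instance

-- ===== CLAIM (what is proved, stated in full; the proofs are below) =====
def Claim_equal_compute_skill_edges : Prop := ∀ (job_skill_map : List (String × List String)), Dom_compute_skill_edges job_skill_map → Spec_compute_skill_edges job_skill_map (compute_skill_edges job_skill_map)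

-- ===== LEMMAS AND PROOFS =====

def pvS (job : String × List String) : PySem.Set String :=
  PySem.Set.ofList (job.2.map PySem.Str.lower)
def pvSortKey (p : String × String) : String × String :=
  if p.2 < p.1 then (p.2, p.1) else (p.1, p.2)
def pvKeys (xs : List String) : List (String × String) :=
  (pvCombs2 xs).map pvSortKey
def pvL (m : List (String × List String)) : List (String × String) :=
  (m.map (fun job => pvKeys (pvS job))).flatten

theorem pv_a_dict (m : List (String × List String)) :
    m.foldl
      (fun ew job =>
        (pvCombs2 (PySem.Set.ofList (job.2.map PySem.Str.lower))).foldl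
          (fun ew p =>
            PySem.Dict.modify ew (if p.2 < p.1 then (p.2, p.1) else (p.1, p.2)) (0 : Int) (· + 1))
          ew)
      (PySem.Dict.empty : PySem.Dict (String × String) Int)
    = PySem.Dict.counter (pvL m) := by
  rw [PySem.Dict.counter_eq_foldl, pvL, List.foldl_flatten, List.foldl_map]
  simp only [pvKeys, pvS, List.foldl_map, pvSortKey]

theorem pv_inner_unchanged (l : List String) (s : String) (hs : s ∉ l)
    (idx : PySem.Dict String (PySem.Set Int)) (pos : Int) :
    (l.foldl (fun idx t => PySem.Dict.modify idx t ([] : PySem.Set Int)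
        (fun js => PySem.Set.add js pos)) idx).getD s []
      = idx.getD s [] := by
  induction l generalizing idx with
  | nil => rfl
  | cons t l ih =>
    simp only [List.mem_cons, not_or] at hs
    rw [List.foldl_cons, ih hs.2, PySem.Dict.getD_modify_of_ne _ _ _ hs.1]

theorem pv_inner_getD (l : List String) (hn : l.Nodup) (s : String)
    (idx : PySem.Dict String (PySem.Set Int)) (pos : Int) :
    (l.foldl (fun idx t => PySem.Dict.modify idx t ([] : PySem.Set Int)
        (fun js => PySem.Set.add js pos)) idx).getD s []
      = if s ∈ l then PySem.Set.add (idx.getD s []) pos else idx.getD s [] := by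
  induction l generalizing idx with
  | nil => simp
  | cons t l ih =>
    rcases List.nodup_cons.mp hn with ⟨ht, hn'⟩
    rw [List.foldl_cons]
    by_cases hst : s = t
    · subst hst
      rw [pv_inner_unchanged _ _ ht, PySem.Dict.getD_modify_self, if_pos (List.mem_cons_self)]
    · rw [ih hn', PySem.Dict.getD_modify_of_ne _ _ _ hst]
      simp [List.mem_cons, hst]

def pvIdx (m : List (String × List String)) (s : String) : PySem.Set Int :=
  ((PySem.List.enumerate m).filter (fun pj => decide (s ∈ pvS pj.2))).map (·.1)

theorem pv_phase1_snd (l : List (Int × (String × List String)))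
    (st : PySem.Dict String (PySem.Set Int) × List (PySem.Set String)) :
    (pvPhase1 l st).2 = st.2 ++ l.map (fun pj => pvS pj.2) := by
  induction l generalizing st with
  | nil => simp [pvPhase1]
  | cons q l ih =>
    rw [pvPhase1, List.foldl_cons, ← pvPhase1, ih]
    simp [pvS]

theorem pv_phase1_fst (l : List (Int × (String × List String))) (s : String)
    (d : PySem.Dict String (PySem.Set Int)) (js : List (PySem.Set String))
    (hpw : l.Pairwise (fun a b => a.1 < b.1))
    (hlt : ∀ x ∈ d.getD s [], ∀ q ∈ l, x < q.1) :
    (pvPhase1 l (d, js)).1.getD s []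
      = d.getD s [] ++ (l.filter (fun pj => decide (s ∈ pvS pj.2))).map (·.1) := by
  induction l generalizing d js with
  | nil => simp [pvPhase1]
  | cons q l ih =>
    rcases List.pairwise_cons.mp hpw with ⟨hq, hpw'⟩
    rw [pvPhase1, List.foldl_cons, ← pvPhase1]
    dsimp only
    have hinner := pv_inner_getD (PySem.Set.ofList (q.2.2.map PySem.Str.lower))
      (PySem.Set.nodup_ofList _) s d q.1
    by_cases hmem : s ∈ pvS q.2
    · have hmem' : s ∈ PySem.Set.ofList (q.2.2.map PySem.Str.lower) := hmem
      rw [if_pos hmem'] at hinner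
      have hnc : (d.getD s []).contains q.1 = false := by
        rw [Bool.eq_false_iff]
        intro hc
        exact absurd (hlt q.1 ((PySem.Set.contains_iff _ _).mp hc) q List.mem_cons_self) (lt_irrefl _)
      have hadd : PySem.Set.add (d.getD s []) q.1 = d.getD s [] ++ [q.1] := by
        rw [PySem.Set.add, hnc]; simp
      rw [ih _ _ hpw' ?later]
      · rw [hinner, hadd, List.filter_cons_of_pos (by simpa using hmem)]
        simp
      case later =>
        intro x hx q' hq'
        rw [hinner, hadd] at hx
        rcases List.mem_append.mp hx with h | h
        · exact lt_trans (hlt x h q List.mem_cons_self) (hq q' hq')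
        · simp at h; subst h; exact hq q' hq'
    · have hmem' : s ∉ PySem.Set.ofList (q.2.2.map PySem.Str.lower) := hmem
      rw [if_neg hmem'] at hinner
      rw [ih _ _ hpw' ?later2]
      · rw [hinner, List.filter_cons_of_neg (by simpa using hmem)]
      case later2 =>
        intro x hx q' hq'
        rw [hinner] at hx
        exact lt_trans (hlt x hx q List.mem_cons_self) (hq q' hq')

theorem pv_index_getD (m : List (String × List String)) (s : String) :
    (pvPhase1 (PySem.List.enumerate m)
        ((PySem.Dict.empty : PySem.Dict String (PySem.Set Int)), [])).1.getD s []
      = pvIdx m s := by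
  rw [pv_phase1_fst _ _ _ _ (PySem.List.pairwise_lt_enumerate m 0)
      (by intro x hx; rw [PySem.Dict.getD_empty] at hx; exact absurd hx (List.not_mem_nil))]
  rw [PySem.Dict.getD_empty, pvIdx, List.nil_append]

theorem pv_foldl_insert_new (w : (String × String) → Int) (L : List (String × String))
    (S0 : List (String × String)) (hn : S0.Nodup) :
    (L.foldl (fun d k => if d.contains k then d else d.insert k (w k))
        (PySem.Dict.mk (S0.map (fun k => (k, w k))))).items
      = (PySem.Set.update S0 L).map (fun k => (k, w k)) := by
  induction L generalizing S0 with
  | nil => simp [PySem.Set.update]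
  | cons k L ih =>
    rw [List.foldl_cons]
    have hkeys : (PySem.Dict.mk (S0.map (fun k => (k, w k)))).contains k = decide (k ∈ S0) := by
      rw [PySem.Dict.contains_eq_decide_mem_keys, PySem.Dict.keys_mk, List.map_map]
      simp
    have hupd : PySem.Set.update S0 (k :: L) = PySem.Set.update (PySem.Set.add S0 k) L := rfl
    by_cases hmem : k ∈ S0
    · rw [hkeys]
      rw [if_pos (by simpa using hmem)]
      have : PySem.Set.add S0 k = S0 := by
        rw [PySem.Set.add]
        simp [hmem]
      rw [hupd, this, ih _ hn]
    · rw [hkeys, if_neg (by simpa using hmem)]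
      have hnc : (PySem.Dict.mk (S0.map (fun k => (k, w k)))).contains k = false := by
        rw [hkeys]; simpa using hmem
      have hins : (PySem.Dict.mk (S0.map (fun k => (k, w k)))).insert k (w k)
          = PySem.Dict.mk ((S0 ++ [k]).map (fun k => (k, w k))) := by
        rw [PySem.Dict.insert, hnc]
        simp
      have hadd : PySem.Set.add S0 k = S0 ++ [k] := by
        rw [PySem.Set.add]
        simp [hmem]
      rw [hins, hupd, hadd, ih _ (by simp only [List.nodup_append, List.nodup_cons]; exact ⟨hn, by simp, by intro p hp q hq; simp at hq; subst hq; exact fun e => hmem (e ▸ hp)⟩)]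

theorem pv_phase2_items (index : PySem.Dict String (PySem.Set Int))
    (job_sets : List (PySem.Set String)) :
    (pvPhase2 index job_sets (PySem.Dict.empty : PySem.Dict (String × String) Int)).items
      = (PySem.Set.ofList ((job_sets.map pvKeys).flatten)).map
          (fun k => (k, PySem.Set.len (PySem.Set.inter
            (PySem.Dict.getD index k.1 []) (PySem.Dict.getD index k.2 [])))) := by
  have h1 : pvPhase2 index job_sets PySem.Dict.empty
      = ((job_sets.map pvKeys).flatten).foldl
          (fun d k => if d.contains k then d
            else d.insert k (PySem.Set.len (PySem.Set.inter
              (PySem.Dict.getD index k.1 []) (PySem.Dict.getD index k.2 []))))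
          PySem.Dict.empty := by
    rw [List.foldl_flatten, List.foldl_map, pvPhase2]
    simp only [pvKeys, List.foldl_map, pvSortKey]
  rw [h1]
  have := pv_foldl_insert_new
    (fun k => PySem.Set.len (PySem.Set.inter
      (PySem.Dict.getD index k.1 []) (PySem.Dict.getD index k.2 [])))
    ((job_sets.map pvKeys).flatten) [] List.nodup_nil
  simpa [PySem.Set.update, ← PySem.Set.ofList_eq_foldl] using this

theorem pv_mem_pvKeys (xs : List String) (hn : xs.Nodup) (a b : String) :
    (a, b) ∈ pvKeys xs ↔ a ∈ xs ∧ b ∈ xs ∧ a < b := by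
  induction xs with
  | nil => simp [pvKeys, pvCombs2]
  | cons x rest ih =>
    rcases List.nodup_cons.mp hn with ⟨hx, hn'⟩
    have hexp : pvKeys (x :: rest) = rest.map (fun y => pvSortKey (x, y)) ++ pvKeys rest := by
      simp [pvKeys, pvCombs2]
    rw [hexp]
    constructor
    · intro h
      rcases List.mem_append.mp h with h | h
      · rcases List.mem_map.mp h with ⟨y, hy, he⟩
        have hxy : x ≠ y := fun e => hx (e ▸ hy)
        rw [pvSortKey] at he
        by_cases hlt : y < x
        · rw [if_pos hlt] at he
          rcases Prod.mk.injEq .. ▸ he with ⟨rfl, rfl⟩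
          exact ⟨List.mem_cons_of_mem _ hy, List.mem_cons_self, hlt⟩
        · rw [if_neg hlt] at he
          rcases Prod.mk.injEq .. ▸ he with ⟨rfl, rfl⟩
          exact ⟨List.mem_cons_self, List.mem_cons_of_mem _ hy,
            lt_of_le_of_ne (not_lt.mp hlt) hxy⟩
      · rcases (ih hn').mp h with ⟨h1, h2, h3⟩
        exact ⟨List.mem_cons_of_mem _ h1, List.mem_cons_of_mem _ h2, h3⟩
    · rintro ⟨h1, h2, h3⟩
      rcases List.mem_cons.mp h1 with rfl | h1'
      · -- a = x : b ∈ rest (b ≠ x since a < b)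
        have hb : b ∈ rest := by
          rcases List.mem_cons.mp h2 with rfl | h
          · exact absurd h3 (lt_irrefl _)
          · exact h
        refine List.mem_append.mpr (Or.inl (List.mem_map.mpr ⟨b, hb, ?_⟩))
        rw [pvSortKey, if_neg (not_lt.mpr (le_of_lt h3))]
      · rcases List.mem_cons.mp h2 with rfl | h2'
        · refine List.mem_append.mpr (Or.inl (List.mem_map.mpr ⟨a, h1', ?_⟩))
          rw [pvSortKey, if_pos h3]
        · exact List.mem_append.mpr (Or.inr ((ih hn').mpr ⟨h1', h2', h3⟩))

theorem pv_nodup_pvKeys (xs : List String) (hn : xs.Nodup) : (pvKeys xs).Nodup := by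
  induction xs with
  | nil => simp [pvKeys, pvCombs2]
  | cons x rest ih =>
    rcases List.nodup_cons.mp hn with ⟨hx, hn'⟩
    have hexp : pvKeys (x :: rest) = rest.map (fun y => pvSortKey (x, y)) ++ pvKeys rest := by
      simp [pvKeys, pvCombs2]
    rw [hexp, List.nodup_append]
    refine ⟨?_, ih hn', ?_⟩
    · refine (List.nodup_map_iff_inj_on hn').mpr ?_
      intro y1 h1 y2 h2 he
      have hxy1 : x ≠ y1 := fun e => hx (e ▸ h1)
      have hxy2 : x ≠ y2 := fun e => hx (e ▸ h2)
      simp only [pvSortKey] at he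
      split_ifs at he with c1 c2 c2 <;> rcases Prod.mk.injEq .. ▸ he with ⟨e1, e2⟩
      · exact e1
      · exact absurd e1.symm hxy1
      · exact absurd e1 hxy2
      · exact e2
    · intro p hp q hq
      rcases List.mem_map.mp hp with ⟨y, hy, rfl⟩
      intro hpq
      subst hpq
      have hxy : x ≠ y := fun e => hx (e ▸ hy)
      have hxin : x = (pvSortKey (x, y)).1 ∨ x = (pvSortKey (x, y)).2 := by
        rw [pvSortKey]; split_ifs <;> simp
      obtain ⟨py1, py2⟩ : (pvSortKey (x, y)).1 ∈ rest ∧ (pvSortKey (x, y)).2 ∈ rest := by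
        have := (pv_mem_pvKeys rest hn' (pvSortKey (x, y)).1 (pvSortKey (x, y)).2).mp (by simpa using hq)
        exact ⟨this.1, this.2.1⟩
      rcases hxin with e | e
      · exact hx (e ▸ py1)
      · exact hx (e ▸ py2)

theorem pv_count_pvKeys (xs : List String) (hn : xs.Nodup) (k : String × String) :
    (pvKeys xs).count k = if k.1 ∈ xs ∧ k.2 ∈ xs ∧ k.1 < k.2 then 1 else 0 := by
  by_cases h : k.1 ∈ xs ∧ k.2 ∈ xs ∧ k.1 < k.2
  · rw [if_pos h]
    exact List.count_eq_one_of_mem (pv_nodup_pvKeys xs hn)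
      ((pv_mem_pvKeys xs hn k.1 k.2).mpr h)
  · rw [if_neg h, List.count_eq_zero]
    intro hc
    exact h ((pv_mem_pvKeys xs hn k.1 k.2).mp hc)

theorem pv_count_pvL (m : List (String × List String)) (k : String × String)
    (hlt : k.1 < k.2) :
    (pvL m).count k = m.countP (fun job => decide (k.1 ∈ pvS job) && decide (k.2 ∈ pvS job)) := by
  rw [pvL, List.count_flatten, List.map_map]
  have : ∀ job : String × List String,
      (List.count k ∘ fun job => pvKeys (pvS job)) job
        = if (fun job => decide (k.1 ∈ pvS job) && decide (k.2 ∈ pvS job)) job = true then 1 else 0 := by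
    intro job
    simp only [Function.comp]
    have hnd : (pvS job).Nodup := by rw [pvS]; exact PySem.Set.nodup_ofList _
    rw [pv_count_pvKeys _ hnd k]
    have hiff : (k.1 ∈ pvS job ∧ k.2 ∈ pvS job ∧ k.1 < k.2)
        ↔ ((decide (k.1 ∈ pvS job) && decide (k.2 ∈ pvS job)) = true) := by
      simp [hlt]
    rw [if_congr hiff rfl rfl]
  rw [List.map_congr_left (fun job _ => this job)]
  exact PySem.List.sum_map_ite_one_zero_nat _ m

def pvW (m : List (String × List String)) (k : String × String) : Int :=
  PySem.Set.len (PySem.Set.inter (pvIdx m k.1) (pvIdx m k.2))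

theorem pv_w_eq_countP (m : List (String × List String)) (k : String × String) :
    pvW m k = (m.countP (fun job => decide (k.1 ∈ pvS job) && decide (k.2 ∈ pvS job)) : Int) := by
  rw [pvW, PySem.Set.inter, PySem.Set.len]
  rw [pvIdx, pvIdx, List.filter_map]
  rw [List.length_map, List.filter_filter]
  simp only [Function.comp_def]
  have hnodup : ((PySem.List.enumerate m).map (fun x => x.1)).Nodup := by
    have := PySem.List.pairwise_lt_enumerate m 0
    exact (List.pairwise_map).mpr (this.imp (fun h => ne_of_lt h))
  have hcong : ∀ pj ∈ PySem.List.enumerate m,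
      (PySem.Set.contains
          (List.map (fun x => x.1) (List.filter (fun pj => decide (k.2 ∈ pvS pj.2)) (PySem.List.enumerate m))) pj.1
        && decide (k.1 ∈ pvS pj.2))
      = (decide (k.1 ∈ pvS pj.2) && decide (k.2 ∈ pvS pj.2)) := by
    intro pj hpj
    have hcont : PySem.Set.contains
        (List.map (fun x => x.1) (List.filter (fun pj => decide (k.2 ∈ pvS pj.2)) (PySem.List.enumerate m))) pj.1
        = decide (k.2 ∈ pvS pj.2) := by
      by_cases h2 : k.2 ∈ pvS pj.2
      · simp only [h2, decide_true]
        refine (PySem.Set.contains_iff _ _).mpr ?_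
        exact List.mem_map.mpr ⟨pj, List.mem_filter.mpr ⟨hpj, by simpa using h2⟩, rfl⟩
      · simp only [h2, decide_false]
        rw [Bool.eq_false_iff]
        intro hc
        rcases List.mem_map.mp ((PySem.Set.contains_iff _ _).mp hc) with ⟨z, hz, he⟩
        rcases List.mem_filter.mp hz with ⟨hzm, hzp⟩
        have : z = pj := List.inj_on_of_nodup_map hnodup hzm hpj he
        subst this
        exact h2 (by simpa using hzp)
    rw [hcont, Bool.and_comm]
  rw [List.filter_congr hcong, ← List.countP_eq_length_filter]
  have : (PySem.List.enumerate m).countP (fun pj => decide (k.1 ∈ pvS pj.2) && decide (k.2 ∈ pvS pj.2))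
      = m.countP (fun job => decide (k.1 ∈ pvS job) && decide (k.2 ∈ pvS job)) := by
    conv_rhs => rw [← PySem.List.map_snd_enumerate m 0]
    rw [List.countP_map]
    simp [Function.comp_def]
  rw [this]

theorem pv_mem_pvL_lt (m : List (String × List String)) (k : String × String)
    (hk : k ∈ pvL m) : k.1 < k.2 := by
  rcases List.mem_flatten.mp hk with ⟨l, hl, hkl⟩
  rcases List.mem_map.mp hl with ⟨job, _, rfl⟩
  have hnd : (pvS job).Nodup := by rw [pvS]; exact PySem.Set.nodup_ofList _
  have := (pv_mem_pvKeys (pvS job) hnd k.1 k.2).mp (by simpa using hkl)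
  exact this.2.2

theorem pv_final (m : List (String × List String)) :
    (PySem.Dict.counter (pvL m)).items.map (fun e => (e.1.1, e.1.2, e.2))
      = (pvPhase2 (pvPhase1 (PySem.List.enumerate m) (PySem.Dict.empty, [])).1
          (pvPhase1 (PySem.List.enumerate m) (PySem.Dict.empty, [])).2
          PySem.Dict.empty).items.map (fun e => (e.1.1, e.1.2, e.2)) := by
  rw [pv_phase1_snd, pv_phase2_items, PySem.Dict.items_counter]
  simp only [pv_index_getD]
  have hjs : (((([] : List (PySem.Set String)) ++ (PySem.List.enumerate m).map (fun pj => pvS pj.2)).map pvKeys).flatten) = pvL m := by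
    rw [List.nil_append, List.map_map, pvL]
    have : (PySem.List.enumerate m).map (pvKeys ∘ fun pj => pvS pj.2)
        = m.map (fun job => pvKeys (pvS job)) := by
      rw [show (pvKeys ∘ fun pj : Int × (String × List String) => pvS pj.2)
            = ((fun job => pvKeys (pvS job)) ∘ fun x => x.2) from rfl]
      rw [← List.map_map, PySem.List.map_snd_enumerate]
    rw [this]
  rw [hjs]
  rw [List.map_map, List.map_map]
  refine List.map_congr_left ?_
  intro k hk
  have hkL : k ∈ pvL m := by
    have := (PySem.Set.mem_ofList (pvL m) k).mp hk
    exact this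
  have hlt := pv_mem_pvL_lt m k hkL
  simp only [Function.comp_def]
  have : PySem.Set.len (PySem.Set.inter (pvIdx m k.1) (pvIdx m k.2)) = (↑((pvL m).count k) : Int) := by
    rw [← pvW, pv_w_eq_countP, pv_count_pvL m k hlt]
  rw [this]

-- ===== VERDICT (by name: the statement is the Claim_ definition above) =====
theorem compute_skill_edges_spec : Claim_equal_compute_skill_edges := by
  intro m _
  show compute_skill_edges m = compute_skill_edges_alt m
  exact (congrArg (fun d => d.items.map (fun e => (e.1.1, e.1.2, e.2))) (pv_a_dict m)).trans (pv_final m)
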